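-- pv_equiv track=rewrite | github.com/SicongCheen/battleships | battleships.py | is_open_sea
-- ===== SOURCE A (Python) =====
-- def is_open_sea(row, column, fleet):
--     """
--     This method checks if the square given by row and column neither contains nor is adjacent
--     (horizontally, vertically, or diagonally) to some ship in fleet.
--     :param row: int
--     :param column: int
--     :param fleet: list
--     :returns result: bool - True if so and False otherwise
--     """
--     result = True
--     if fleet:
--         for i in range(len(fleet)):
--             # get squares occupied by a ship
--             squares_occupied = []
--             for j in range(fleet[i][3]):
--                 # if horizontal
--                 if fleet[i][2]:
--                     squares_occupied.append((fleet[i][0], fleet[i][1] + j))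
--                 # if vertical
--                 else:
--                     squares_occupied.append((fleet[i][0] + j, fleet[i][1]))
--             # check squares conflicts
--             for j in range(len(squares_occupied)):
--                 if abs(row - squares_occupied[j][0]) <= 1 and abs(column - squares_occupied[j][1]) <= 1:
--                     result = False
--                     return result
--     return result
-- ===== SOURCE B (Python) =====
-- def is_open_sea(row, column, fleet):
--     """Per-ship O(1) interval-overlap test: a ship occupying an interval of
--     squares is adjacent to (row, column) iff the square lies in the interval
--     inflated by one in each direction."""
--     for r, c, horizontal, length in fleet:
--         if length <= 0:
--             continue
--         if horizontal:
--             if abs(row - r) <= 1 and c - 1 <= column <= c + length: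
--                 return False
--         else:
--             if abs(column - c) <= 1 and r - 1 <= row <= r + length:
--                 return False
--     return True
-- ===== Notes on version B (the rewrite author's own statement) =====
-- stated objective: faster
-- what changed: Replaces the per-ship enumeration of every occupied square (build a list, then scan it) with a constant-time interval-overlap adjacency test per ship.
import Mathlib
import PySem

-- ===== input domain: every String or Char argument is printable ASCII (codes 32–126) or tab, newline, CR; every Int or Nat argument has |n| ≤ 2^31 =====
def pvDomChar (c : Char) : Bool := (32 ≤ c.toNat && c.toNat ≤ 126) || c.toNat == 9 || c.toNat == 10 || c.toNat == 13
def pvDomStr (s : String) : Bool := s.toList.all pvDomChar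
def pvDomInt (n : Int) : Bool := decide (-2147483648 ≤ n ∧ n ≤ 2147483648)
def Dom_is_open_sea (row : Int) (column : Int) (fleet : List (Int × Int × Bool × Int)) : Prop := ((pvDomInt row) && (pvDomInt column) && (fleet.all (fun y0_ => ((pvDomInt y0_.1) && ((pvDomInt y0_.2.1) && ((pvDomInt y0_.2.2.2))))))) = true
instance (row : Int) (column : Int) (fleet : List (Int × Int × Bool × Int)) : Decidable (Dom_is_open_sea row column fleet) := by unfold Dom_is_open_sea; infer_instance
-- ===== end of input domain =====

-- B replaces A's per-ship enumeration of every occupied square with a constant-time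
-- interval-overlap adjacency test per ship (objective: faster, O(n) vs O(n·L)).

-- ===== PORT A =====
-- squares_occupied built by the inner 'for j in range(fleet[i][3])' loop
def pvA_squares (ship : Int × Int × Bool × Int) : List (Int × Int) :=
  (PySem.List.pyRange 0 ship.2.2.2 1).foldl
    (fun acc j => acc ++ [if ship.2.2.1 then (ship.1, ship.2.1 + j) else (ship.1 + j, ship.2.1)]) []

-- the 'for j in range(len(squares_occupied))' scan with its early return
def pvA_scan (row column : Int) : List (Int × Int) → Bool
  | [] => false
  | sq :: rest =>
    if |row - sq.1| ≤ 1 ∧ |column - sq.2| ≤ 1 then true else pvA_scan row column rest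

def is_open_sea (row : Int) (column : Int) (fleet : List (Int × Int × Bool × Int)) : Bool :=
  match fleet with
  | [] => true
  | ship :: rest =>
    if pvA_scan row column (pvA_squares ship) then false else is_open_sea row column rest

-- ===== PORT B =====
def is_open_sea_alt (row : Int) (column : Int) (fleet : List (Int × Int × Bool × Int)) : Bool :=
  match fleet with
  | [] => true
  | (r, c, horizontal, length) :: rest =>
    if length ≤ 0 then is_open_sea_alt row column rest
    else if horizontal then
      if |row - r| ≤ 1 ∧ c - 1 ≤ column ∧ column ≤ c + length then false
      else is_open_sea_alt row column rest
    else
      if |column - c| ≤ 1 ∧ r - 1 ≤ row ∧ row ≤ r + length then false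
      else is_open_sea_alt row column rest

-- ===== PRECONDITION & SPEC =====
def Spec_is_open_sea (row : Int) (column : Int) (fleet : List (Int × Int × Bool × Int)) (out : Bool) : Prop := out = is_open_sea_alt row column fleet
instance (row : Int) (column : Int) (fleet : List (Int × Int × Bool × Int)) (out : Bool) : Decidable (Spec_is_open_sea row column fleet out) := by unfold Spec_is_open_sea; infer_instance

-- ===== CLAIM (what is proved, stated in full; the proofs are below) =====
def Claim_equal_is_open_sea : Prop := ∀ (row : Int) (column : Int) (fleet : List (Int × Int × Bool × Int)), Dom_is_open_sea row column fleet → Spec_is_open_sea row column fleet (is_open_sea row column fleet)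

-- ===== LEMMAS AND PROOFS =====

theorem pvA_foldl_snoc {α β : Type} (f : α → β) (l : List α) (acc : List β) :
    l.foldl (fun a j => a ++ [f j]) acc = acc ++ l.map f := by
  induction l generalizing acc with
  | nil => simp
  | cons x xs ih => simp [List.foldl, ih]

theorem pvA_squares_eq (ship : Int × Int × Bool × Int) :
    pvA_squares ship = (PySem.List.pyRange 0 ship.2.2.2 1).map
      (fun j => if ship.2.2.1 then (ship.1, ship.2.1 + j) else (ship.1 + j, ship.2.1)) := by
  unfold pvA_squares
  rw [pvA_foldl_snoc]
  simp

theorem pvA_scan_eq_any (row column : Int) (xs : List (Int × Int)) :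
    pvA_scan row column xs = xs.any (fun p => decide (|row - p.1| ≤ 1 ∧ |column - p.2| ≤ 1)) := by
  induction xs with
  | nil => rfl
  | cons x rest ih =>
    simp only [pvA_scan, List.any_cons, ih]
    by_cases h : |row - x.1| ≤ 1 ∧ |column - x.2| ≤ 1 <;> simp [h]

theorem pvA_hit_iff (row column r c length : Int) (horizontal : Bool) :
    pvA_scan row column (pvA_squares (r, c, horizontal, length)) = true ↔
      (if horizontal then |row - r| ≤ 1 ∧ c - 1 ≤ column ∧ column ≤ c + length ∧ 0 < length
       else |column - c| ≤ 1 ∧ r - 1 ≤ row ∧ row ≤ r + length ∧ 0 < length) := by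
  rw [pvA_scan_eq_any, pvA_squares_eq]
  simp only [List.any_map, List.any_eq_true, Function.comp, decide_eq_true_eq,
    PySem.List.mem_pyRange_one, abs_le]
  cases horizontal with
  | true =>
    simp only [if_true]
    constructor
    · rintro ⟨j, ⟨hj0, hjl⟩, hc⟩
      omega
    · rintro ⟨h1, h2, h3, h4⟩
      exact ⟨max 0 (min (column - c) (length - 1)), ⟨by omega, by omega⟩, by omega⟩
  | false =>
    simp only [Bool.false_eq_true, if_false]
    constructor
    · rintro ⟨j, ⟨hj0, hjl⟩, hc⟩
      omega
    · rintro ⟨h1, h2, h3, h4⟩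
      exact ⟨max 0 (min (row - r) (length - 1)), ⟨by omega, by omega⟩, by omega⟩

theorem pv_main (row column : Int) (fleet : List (Int × Int × Bool × Int)) :
    is_open_sea row column fleet = is_open_sea_alt row column fleet := by
  induction fleet with
  | nil => rfl
  | cons ship rest ih =>
    obtain ⟨r, c, horizontal, length⟩ := ship
    simp only [is_open_sea, is_open_sea_alt]
    have hhit := pvA_hit_iff row column r c length horizontal
    by_cases hl : length ≤ 0
    · have hfalse : pvA_scan row column (pvA_squares (r, c, horizontal, length)) = false := by
        rw [Bool.eq_false_iff]
        intro hc
        rw [hhit] at hc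
        cases horizontal <;> simp_all <;> omega
      rw [hfalse, if_pos hl]
      simpa using ih
    · rw [if_neg hl]
      cases horizontal with
      | true =>
        simp only [] at hhit ⊢
        by_cases hcond : |row - r| ≤ 1 ∧ c - 1 ≤ column ∧ column ≤ c + length
        · have : pvA_scan row column (pvA_squares (r, c, true, length)) = true := by
            rw [hhit]; exact ⟨hcond.1, hcond.2.1, hcond.2.2, by omega⟩
          rw [this, if_pos hcond]; rfl
        · have : pvA_scan row column (pvA_squares (r, c, true, length)) = false := by
            rw [Bool.eq_false_iff]; intro hc; rw [hhit] at hc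
            exact hcond ⟨hc.1, hc.2.1, hc.2.2.1⟩
          rw [this, if_neg hcond]
          simpa using ih
      | false =>
        simp only [Bool.false_eq_true, if_false] at hhit ⊢
        by_cases hcond : |column - c| ≤ 1 ∧ r - 1 ≤ row ∧ row ≤ r + length
        · have : pvA_scan row column (pvA_squares (r, c, false, length)) = true := by
            rw [hhit]; exact ⟨hcond.1, hcond.2.1, hcond.2.2, by omega⟩
          rw [this, if_pos hcond]; rfl
        · have : pvA_scan row column (pvA_squares (r, c, false, length)) = false := by
            rw [Bool.eq_false_iff]; intro hc; rw [hhit] at hc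
            exact hcond ⟨hc.1, hc.2.1, hc.2.2.1⟩
          rw [this, if_neg hcond]
          simpa using ih

-- ===== VERDICT (by name: the statement is the Claim_ definition above) =====
theorem is_open_sea_spec : Claim_equal_is_open_sea := by
  intro row column fleet _
  exact pv_main row column fleet
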